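-- pv_equiv track=rewrite | github.com/paulkarayan/melodic-interpreter | core/brenda_variations.py | notes_to_abc
-- ===== SOURCE A (Python) =====
-- from typing import List, Dict, Tuple
--
-- def notes_to_abc(notes: List[Tuple[str, int]]) -> str:
--     """Convert (note, duration) pairs back to ABC notation with proper beaming for 6/8"""
--     result = []
--     total_duration = 0
--
--     for i, (note, duration) in enumerate(notes):
--         # Add the note
--         if duration == 1:
--             result.append(note)
--         else:
--             result.append(f"{note}{duration}")
--
--         total_duration += duration
--
--         # Add space after every 3 eighth notes for 6/8 beaming
--         # (but not at the end)
--         if total_duration % 3 == 0 and i < len(notes) - 1: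
--             result.append(' ')
--
--     return ''.join(result)
-- ===== SOURCE B (Python) =====
-- from typing import List, Tuple
--
--
-- def notes_to_abc(notes: List[Tuple[str, int]]) -> str:
--     """Convert (note, duration) pairs to ABC notation with 6/8 beaming.
--
--     Two-phase: first build the token list and the running cumulative
--     durations, then group the tokens into beam segments and join them.
--     """
--     tokens = [note if duration == 1 else f"{note}{duration}"
--               for note, duration in notes]
--     cums = []
--     t = 0
--     for _, duration in notes:
--         t += duration
--         cums.append(t)
--
--     segments = []
--     cur = []
--     for i, (tok, cum) in enumerate(zip(tokens, cums)):
--         cur.append(tok)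
--         if cum % 3 == 0 and i < len(tokens) - 1:
--             segments.append(''.join(cur))
--             cur = []
--     if cur:
--         segments.append(''.join(cur))
--     return ' '.join(segments)
-- ===== Notes on version B (the rewrite author's own statement) =====
-- stated objective: alternative
-- what changed: Replaces A's single interleaved loop that appends notes and spaces into one flat list with a two-phase strategy: first map the notes to tokens and prefix-sum the durations, then group the tokens into beam segments at cumulative durations divisible by 3 and join the segments with spaces.
import Mathlib
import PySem

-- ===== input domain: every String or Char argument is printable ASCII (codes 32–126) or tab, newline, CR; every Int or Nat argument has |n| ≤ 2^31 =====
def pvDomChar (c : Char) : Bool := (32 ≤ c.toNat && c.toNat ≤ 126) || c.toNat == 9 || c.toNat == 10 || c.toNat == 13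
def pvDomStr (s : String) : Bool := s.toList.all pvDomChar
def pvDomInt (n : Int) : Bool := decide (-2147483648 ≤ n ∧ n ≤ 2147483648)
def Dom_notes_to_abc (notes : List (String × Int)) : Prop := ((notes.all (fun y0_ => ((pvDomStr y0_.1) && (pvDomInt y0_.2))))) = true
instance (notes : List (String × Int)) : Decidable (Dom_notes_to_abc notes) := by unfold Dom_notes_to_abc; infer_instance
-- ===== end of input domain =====

-- B rebuilds the result in two phases (tokens + prefix sums, then grouping into beam
-- segments joined by spaces) instead of A's single interleaved loop; same O(n) cost.

-- ===== PORT A =====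
-- the for-loop of A: state = (result, total), index i, n = len(notes)
def pvLoopA : List (String × Int) → Nat → Nat → List String → Int → List String
  | [], _, _, result, _ => result
  | (note, duration) :: rest, i, n, result, total =>
    let result1 := result ++ [if duration = 1 then note else note ++ PySem.Int.toStr duration]
    let total1 := total + duration
    let result2 := if PySem.Int.mod total1 3 = 0 ∧ (i : Int) < (n : Int) - 1
      then result1 ++ [" "] else result1
    pvLoopA rest (i + 1) n result2 total1

def notes_to_abc (notes : List (String × Int)) : String :=
  PySem.Str.join "" (pvLoopA notes 0 notes.length [] 0)

-- ===== PORT B =====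
def pvToken (p : String × Int) : String :=
  if p.2 = 1 then p.1 else p.1 ++ PySem.Int.toStr p.2

-- the prefix sums of the durations ("cums" in Source B), t = running total
def pvCums : List (String × Int) → Int → List Int
  | [], _ => []
  | p :: rest, t => (t + p.2) :: pvCums rest (t + p.2)

-- the grouping loop of Source B over zip(tokens, cums): state = (segments, cur)
def pvGroup : List (String × Int) → Nat → Nat → List String → List String → List String
  | [], _, _, segments, cur =>
    if cur ≠ [] then segments ++ [PySem.Str.join "" cur] else segments
  | (tok, cum) :: rest, i, n, segments, cur =>
    let cur1 := cur ++ [tok]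
    if PySem.Int.mod cum 3 = 0 ∧ (i : Int) < (n : Int) - 1 then
      pvGroup rest (i + 1) n (segments ++ [PySem.Str.join "" cur1]) []
    else
      pvGroup rest (i + 1) n segments cur1

def notes_to_abc_alt (notes : List (String × Int)) : String :=
  PySem.Str.join " " (pvGroup ((notes.map pvToken).zip (pvCums notes 0)) 0 (notes.map pvToken).length [] [])

-- ===== PRECONDITION & SPEC =====
def Spec_notes_to_abc (notes : List (String × Int)) (out : String) : Prop := out = notes_to_abc_alt notes
instance (notes : List (String × Int)) (out : String) : Decidable (Spec_notes_to_abc notes out) := by unfold Spec_notes_to_abc; infer_instance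

-- ===== CLAIM (what is proved, stated in full; the proofs are below) =====
def Claim_equal_notes_to_abc : Prop := ∀ (notes : List (String × Int)), Dom_notes_to_abc notes → Spec_notes_to_abc notes (notes_to_abc notes)

-- ===== LEMMAS AND PROOFS =====

-- the character stream both programs produce, as one recursion over the notes
def pvRef : List (String × Int) → Nat → Nat → Int → List Char
  | [], _, _, _ => []
  | p :: rest, i, n, total =>
    (pvToken p).toList ++
      (if PySem.Int.mod (total + p.2) 3 = 0 ∧ (i : Int) < (n : Int) - 1 then [' '] else []) ++
      pvRef rest (i + 1) n (total + p.2)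

theorem pv_inter_nil : ∀ (l : List (List Char)), List.intercalate [] l = l.flatten
  | [] => rfl
  | [_] => by simp [List.intercalate]
  | a :: b :: l => by
    have ih := pv_inter_nil (b :: l)
    simp only [List.intercalate, List.intersperse] at ih ⊢
    simp_all

theorem pv_inter_snoc (s x : List Char) : ∀ (S : List (List Char)),
    List.intercalate s (S ++ [x]) = if S = [] then x else List.intercalate s S ++ s ++ x
  | [] => by simp [List.intercalate]
  | [a] => by simp [List.intercalate]
  | a :: b :: S => by
    have ih := pv_inter_snoc s x (b :: S)
    simp only [List.intercalate, List.intersperse, List.cons_append] at ih ⊢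
    simp_all

theorem pv_inter_two_snoc (s a b : List Char) (S : List (List Char)) :
    List.intercalate s (S ++ [a, b]) = List.intercalate s (S ++ [a ++ s ++ b]) := by
  have h1 := pv_inter_snoc s b (S ++ [a])
  rw [List.append_assoc] at h1
  rw [show ([a] ++ [b] : List (List Char)) = [a, b] from rfl] at h1
  rw [h1, pv_inter_snoc s a S, pv_inter_snoc s (a ++ s ++ b) S]
  rcases eq_or_ne S [] with rfl | hS
  · simp
  · simp [hS, List.append_assoc]

-- ''.join over a snoc
theorem pv_joinE_snoc (R : List String) (x : String) :
    (PySem.Str.join "" (R ++ [x])).toList = (PySem.Str.join "" R).toList ++ x.toList := by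
  simp [PySem.Str.toList_join, PySem.Chars.join, pv_inter_nil]

-- ' '.join as intercalate on char lists
theorem pv_joinSp (X : List String) :
    (PySem.Str.join " " X).toList = List.intercalate [' '] (X.map String.toList) := by
  simp [PySem.Str.toList_join, PySem.Chars.join]

-- A's loop produces exactly pvRef appended to the accumulated result
theorem pv_loopA_join : ∀ (rest : List (String × Int)) (i n : Nat) (R : List String) (total : Int),
    (PySem.Str.join "" (pvLoopA rest i n R total)).toList
      = (PySem.Str.join "" R).toList ++ pvRef rest i n total
  | [], _, _, _, _ => by simp [pvLoopA, pvRef]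
  | (note, duration) :: rest, i, n, R, total => by
    simp only [pvLoopA, pvRef]
    by_cases hc : PySem.Int.mod (total + duration) 3 = 0 ∧ (i : Int) < (n : Int) - 1
    · rw [if_pos hc, if_pos hc, pv_loopA_join rest (i + 1) n _ (total + duration)]
      rw [pv_joinE_snoc, pv_joinE_snoc]
      simp [pvToken, List.append_assoc]
    · rw [if_neg hc, if_neg hc, pv_loopA_join rest (i + 1) n _ (total + duration)]
      rw [pv_joinE_snoc]
      simp [pvToken, List.append_assoc]

-- B's grouping loop: invariant relating (segments, cur) to pvRef, while i + |rest| = n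
theorem pv_groupB_join : ∀ (rest : List (String × Int)) (i n : Nat) (total : Int)
    (segments cur : List String), n = i + rest.length → rest ≠ [] →
    (PySem.Str.join " " (pvGroup ((rest.map pvToken).zip (pvCums rest total)) i n segments cur)).toList
      = List.intercalate [' ']
          (segments.map String.toList ++ [(PySem.Str.join "" cur).toList ++ pvRef rest i n total])
  | [], _, _, _, _, _, _, hne => absurd rfl hne
  | p :: rest, i, n, total, segments, cur, hn, _ => by
    -- one step of the loop, kept as a single rewrite
    have hstep : ∀ (Z : List (String × Int)) (segs c : List String),
        pvGroup ((pvToken p, total + p.2) :: Z) i n segs c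
          = if PySem.Int.mod (total + p.2) 3 = 0 ∧ (i : Int) < (n : Int) - 1 then
              pvGroup Z (i + 1) n (segs ++ [PySem.Str.join "" (c ++ [pvToken p])]) []
            else pvGroup Z (i + 1) n segs (c ++ [pvToken p]) := fun _ _ _ => rfl
    have href : pvRef (p :: rest) i n total
        = (pvToken p).toList ++
            (if PySem.Int.mod (total + p.2) 3 = 0 ∧ (i : Int) < (n : Int) - 1 then [' '] else []) ++
            pvRef rest (i + 1) n (total + p.2) := rfl
    rw [show ((p :: rest).map pvToken).zip (pvCums (p :: rest) total)
          = (pvToken p, total + p.2) :: ((rest.map pvToken).zip (pvCums rest (total + p.2))) from rfl,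
        hstep, href]
    rcases rest with _ | ⟨q, rest'⟩ <;>
      simp only [List.length_cons, List.length_nil] at hn
    · have hcond : ¬ (PySem.Int.mod (total + p.2) 3 = 0 ∧ (i : Int) < (n : Int) - 1) := by
        rintro ⟨-, h2⟩; omega
      rw [if_neg hcond, if_neg hcond]
      have hne2 : cur ++ [pvToken p] ≠ [] := by simp
      show (PySem.Str.join " " (pvGroup [] (i + 1) n segments (cur ++ [pvToken p]))).toList = _
      simp only [pvGroup, if_pos hne2]
      rw [pv_joinSp, List.map_append, List.map, pv_joinE_snoc]
      simp [pvRef]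
    · have hlt : (i : Int) < (n : Int) - 1 := by omega
      by_cases hm : PySem.Int.mod (total + p.2) 3 = 0
      · rw [if_pos ⟨hm, hlt⟩, if_pos ⟨hm, hlt⟩]
        rw [pv_groupB_join (q :: rest') (i + 1) n (total + p.2)
              (segments ++ [PySem.Str.join "" (cur ++ [pvToken p])]) []
              (by simp only [List.length_cons]; omega) (by simp)]
        rw [List.map_append, List.map, pv_joinE_snoc]
        have h2 := pv_inter_two_snoc [' ']
          ((PySem.Str.join "" cur).toList ++ (pvToken p).toList)
          (pvRef (q :: rest') (i + 1) n (total + p.2))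
          (segments.map String.toList)
        simp only [List.append_assoc] at h2 ⊢
        rw [← h2]
        simp [List.intercalate, PySem.Str.toList_join, PySem.Chars.join]
      · have hcond : ¬ (PySem.Int.mod (total + p.2) 3 = 0 ∧ (i : Int) < (n : Int) - 1) := by
          rintro ⟨h1, -⟩; exact hm h1
        rw [if_neg hcond, if_neg hcond]
        rw [pv_groupB_join (q :: rest') (i + 1) n (total + p.2) segments (cur ++ [pvToken p])
              (by simp only [List.length_cons]; omega) (by simp)]
        rw [pv_joinE_snoc]
        simp [List.append_assoc]

-- ===== VERDICT (by name: the statement is the Claim_ definition above) =====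
theorem notes_to_abc_spec : Claim_equal_notes_to_abc := by
  intro notes _
  unfold Spec_notes_to_abc notes_to_abc notes_to_abc_alt
  apply String.toList_inj.mp
  rcases eq_or_ne notes [] with rfl | hne
  · rfl
  · rw [pv_loopA_join notes 0 notes.length [] 0]
    rw [show (notes.map pvToken).length = notes.length from List.length_map ..]
    rw [pv_groupB_join notes 0 notes.length 0 [] [] (by simp) hne]
    simp [List.intercalate, PySem.Str.toList_join, PySem.Chars.join]
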